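-- pv_equiv track=rewrite | github.com/naitkaci-anis/connect4 | web_backend/ai_engine.py | _build_col_masks
-- ===== SOURCE A (Python) =====
-- from typing import List, Optional, Dict, Tuple
--
-- def _build_col_masks(rows: int, cols: int) -> List[int]:
--     """Masque de bits pour chaque colonne (tous les bits de la colonne c à 1)."""
--     masks = []
--     for c in range(cols):
--         m = 0
--         for r in range(rows):
--             m |= 1 << (r * cols + c)
--         masks.append(m)
--     return masks
-- ===== SOURCE B (Python) =====
-- def _build_col_masks(rows: int, cols: int):
--     """Build column 0's mask once, then shift it for each column."""
--     if cols <= 0: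
--         return []
--     col0 = 0
--     for r in range(rows):
--         col0 |= 1 << (r * cols)
--     return [col0 << c for c in range(cols)]
-- ===== Notes on version B (the rewrite author's own statement) =====
-- stated objective: alternative
-- what changed: A recomputes every bit of every column with a nested rows*cols loop; B builds only column 0's mask in one loop and derives each column's mask by a single shift (measured ~5x faster at mid sizes, but both are dominated by bigint cost on the largest inputs, so faster is not claimed).
import Mathlib
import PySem

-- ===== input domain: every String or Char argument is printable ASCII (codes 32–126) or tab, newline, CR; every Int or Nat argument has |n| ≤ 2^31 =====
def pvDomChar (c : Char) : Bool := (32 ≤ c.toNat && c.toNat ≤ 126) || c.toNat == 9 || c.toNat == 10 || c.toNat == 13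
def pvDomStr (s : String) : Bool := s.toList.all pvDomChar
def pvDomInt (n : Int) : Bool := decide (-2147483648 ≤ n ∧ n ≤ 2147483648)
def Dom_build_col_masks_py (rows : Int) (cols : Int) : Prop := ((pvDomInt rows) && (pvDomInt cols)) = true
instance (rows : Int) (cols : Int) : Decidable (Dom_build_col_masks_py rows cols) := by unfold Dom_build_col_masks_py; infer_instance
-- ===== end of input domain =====

-- B replaces A's nested per-bit loop by building column 0's mask once and shifting it per column.

-- ===== PORT A =====
-- for c in range(cols): m = 0; for r in range(rows): m |= 1 << (r*cols + c); masks.append(m)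
def build_col_masks_py (rows : Int) (cols : Int) : List Int :=
  (PySem.List.pyRange 0 cols 1).foldl (fun masks c =>
    masks ++ [(PySem.List.pyRange 0 rows 1).foldl
      (fun m r => PySem.Int.bor m ((1 : Int) <<< (r * cols + c).toNat)) 0]) []

-- ===== PORT B =====
-- if cols <= 0: []; col0 = OR of 1 << (r*cols); result = [col0 << c for c in range(cols)]
def build_col_masks_py_alt (rows : Int) (cols : Int) : List Int :=
  if cols ≤ 0 then []
  else
    let col0 := (PySem.List.pyRange 0 rows 1).foldl
      (fun m r => PySem.Int.bor m ((1 : Int) <<< (r * cols).toNat)) 0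
    (PySem.List.pyRange 0 cols 1).map (fun c => col0 <<< c.toNat)

-- ===== PRECONDITION & SPEC =====
def Spec_build_col_masks_py (rows : Int) (cols : Int) (out : List Int) : Prop := out = build_col_masks_py_alt rows cols
instance (rows : Int) (cols : Int) (out : List Int) : Decidable (Spec_build_col_masks_py rows cols out) := by unfold Spec_build_col_masks_py; infer_instance

-- ===== CLAIM (what is proved, stated in full; the proofs are below) =====
def Claim_equal_build_col_masks_py : Prop := ∀ (rows : Int) (cols : Int), Dom_build_col_masks_py rows cols → Spec_build_col_masks_py rows cols (build_col_masks_py rows cols)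

-- ===== LEMMAS AND PROOFS =====

-- foldl-append accumulation is map
lemma foldl_append_map {α β : Type} (f : α → β) (l : List α) (init : List β) :
    l.foldl (fun acc c => acc ++ [f c]) init = init ++ l.map f := by
  induction l generalizing init with
  | nil => simp
  | cons x xs ih => simp [List.foldl_cons, ih]

-- shift distributes over bor on nonnegative integers
lemma bor_shiftLeft (a b : Int) (ha : 0 ≤ a) (hb : 0 ≤ b) (k : Nat) :
    (PySem.Int.bor a b) <<< k = PySem.Int.bor (a <<< k) (b <<< k) := by
  rw [PySem.Int.bor_of_nonneg ha hb]
  have hs : ∀ (m : Nat), ((m : Int)) <<< k = ((m <<< k : Nat) : Int) := by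
    intro m; simp [Int.shiftLeft_eq, Nat.shiftLeft_eq]
  rw [hs, Nat.shiftLeft_or_distrib]
  have ha' : a <<< k = ((a.toNat <<< k : Nat) : Int) := by
    conv_lhs => rw [← Int.toNat_of_nonneg ha]
    exact hs a.toNat
  have hb' : b <<< k = ((b.toNat <<< k : Nat) : Int) := by
    conv_lhs => rw [← Int.toNat_of_nonneg hb]
    exact hs b.toNat
  rw [ha', hb', PySem.Int.bor_natCast]

lemma shift_shift (a : Int) (m n : Nat) : (a <<< m) <<< n = a <<< (m + n) := by
  simp [Int.shiftLeft_eq, pow_add]; ring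

lemma shift_nonneg (a : Int) (ha : 0 ≤ a) (k : Nat) : 0 ≤ a <<< k := by
  rw [Int.shiftLeft_eq]; positivity

-- the inner fold for column c equals column 0's fold shifted by c
lemma fold_shift (cols c : Int) (hc : 0 ≤ c) (l : List Int) (hl : ∀ r ∈ l, 0 ≤ r * cols)
    (a : Int) (ha : 0 ≤ a) :
    l.foldl (fun m r => PySem.Int.bor m ((1 : Int) <<< (r * cols + c).toNat)) (a <<< c.toNat)
      = (l.foldl (fun m r => PySem.Int.bor m ((1 : Int) <<< (r * cols).toNat)) a) <<< c.toNat := by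
  induction l generalizing a with
  | nil => simp
  | cons x xs ih =>
    have hx : 0 ≤ x * cols := hl x (by simp)
    have hstep : PySem.Int.bor (a <<< c.toNat) ((1 : Int) <<< (x * cols + c).toNat)
        = (PySem.Int.bor a ((1 : Int) <<< (x * cols).toNat)) <<< c.toNat := by
      have he : (x * cols + c).toNat = (x * cols).toNat + c.toNat := by omega
      rw [he, bor_shiftLeft a _ ha (shift_nonneg 1 (by norm_num) _), shift_shift,
        Nat.add_comm]
    have hnn : 0 ≤ PySem.Int.bor a ((1 : Int) <<< (x * cols).toNat) := by
      rw [PySem.Int.bor_of_nonneg ha (shift_nonneg 1 (by norm_num) _)]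
      exact Int.natCast_nonneg _
    simp only [List.foldl_cons, hstep]
    exact ih (fun r hr => hl r (by simp [hr])) _ hnn

-- ===== VERDICT (by name: the statement is the Claim_ definition above) =====
theorem build_col_masks_py_spec : Claim_equal_build_col_masks_py := by
  intro rows cols _
  unfold Spec_build_col_masks_py build_col_masks_py build_col_masks_py_alt
  by_cases h : cols ≤ 0
  · simp [h, PySem.List.pyRange_one_eq_nil h]
  · simp only [h, if_false]
    rw [foldl_append_map, List.nil_append]
    apply List.map_congr_left
    intro c hc
    rw [PySem.List.mem_pyRange_one] at hc
    have h0 : ∀ r ∈ PySem.List.pyRange 0 rows 1, 0 ≤ r * cols := by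
      intro r hr
      rw [PySem.List.mem_pyRange_one] at hr
      exact mul_nonneg hr.1 (by omega)
    have hz : (0 : Int) <<< c.toNat = 0 := by simp [Int.shiftLeft_eq]
    have := fold_shift cols c hc.1 (PySem.List.pyRange 0 rows 1) h0 0 le_rfl
    rw [hz] at this
    rw [this, Int.shiftLeft_natCast_right]
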